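-- pv_equiv track=rewrite | github.com/kamalesh-pathy-va/coding-questions | sortAccordingToFactors.py | solution
-- ===== SOURCE A (Python) =====
-- def factors(num):
-- 	count = 0
-- 	for i in range(1, num+1):
-- 		if num % i == 0:
-- 			count += 1
-- 	return count
--
-- def solution(arr):
-- 	values = []
-- 	for i in arr:
-- 		values.append(factors(i))
--
-- 	for i in range(len(values)):
-- 		for j in range(i+1, len(values)):
-- 			if values[i] >= values[j]:
-- 				temp = values[i]
-- 				values[i] = values[j]
-- 				values[j] = temp
-- 				temp = arr[i]
-- 				arr[i] = arr[j]
-- 				arr[j] = temp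
--
--
-- 	return arr[::-1]
-- ===== SOURCE B (Python) =====
-- # B: O(sqrt(v)) divisor counting + one stable library sort (reverse=True),
-- # instead of A's O(v) counting and O(n^2) swap sort.  Return value only:
-- # A sorts its argument list in place, B does not mutate it.
-- def solution(arr):
-- 	def nfac(n):
-- 		if n <= 0:
-- 			return 0
-- 		count = 0
-- 		i = 1
-- 		while i * i <= n:
-- 			if n % i == 0:
-- 				count += 1 if i * i == n else 2
-- 			i += 1
-- 		return count
-- 	return sorted(arr, key=nfac, reverse=True)
-- ===== Notes on version B (the rewrite author's own statement) =====
-- stated objective: faster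
-- what changed: Replaces the O(v) trial count of divisors by the O(sqrt(v)) paired-divisor count and the O(n^2) in-place swap sort by one stable library sort with reverse=True.
import Mathlib
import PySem

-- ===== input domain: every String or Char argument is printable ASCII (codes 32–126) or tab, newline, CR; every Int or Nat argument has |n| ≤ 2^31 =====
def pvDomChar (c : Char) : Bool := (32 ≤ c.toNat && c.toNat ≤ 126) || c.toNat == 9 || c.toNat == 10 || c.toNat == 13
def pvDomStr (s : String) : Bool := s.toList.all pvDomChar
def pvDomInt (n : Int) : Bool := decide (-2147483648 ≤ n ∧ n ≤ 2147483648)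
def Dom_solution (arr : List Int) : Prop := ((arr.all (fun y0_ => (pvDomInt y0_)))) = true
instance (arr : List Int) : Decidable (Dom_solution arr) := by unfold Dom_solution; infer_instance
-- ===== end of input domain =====

-- B replaces A's O(v) divisor counting with a paired divisor count up to the square root
-- and A's quadratic in-place swap sort with one stable sorted(..., reverse=True).
-- A sorts its argument list in place, B does not mutate it: the equivalence proved here
-- is about the return value.

-- ===== PORT A =====
def factorsA (num : Int) : Int :=
  (PySem.List.pyRange 1 (num + 1) 1).foldl
    (fun count i => if PySem.Int.mod num i = 0 then count + 1 else count) 0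

def solution (arr : List Int) : List Int :=
  let values : List Int := arr.foldl (fun acc i => acc ++ [factorsA i]) []
  let st :=
    (PySem.List.pyRange 0 (values.length : Int) 1).foldl (fun st i =>
      (PySem.List.pyRange (i + 1) ((st.1.length : Int)) 1).foldl (fun st j =>
        if PySem.List.pyGetD st.1 i 0 ≥ PySem.List.pyGetD st.1 j 0 then
          let temp := PySem.List.pyGetD st.1 i 0
          let values' := PySem.List.pySetD st.1 i (PySem.List.pyGetD st.1 j 0)
          let values'' := PySem.List.pySetD values' j temp
          let temp2 := PySem.List.pyGetD st.2 i 0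
          let arr' := PySem.List.pySetD st.2 i (PySem.List.pyGetD st.2 j 0)
          let arr'' := PySem.List.pySetD arr' j temp2
          (values'', arr'')
        else st) st)
      (values, arr)
  (PySem.List.slice? st.2 none none (-1)).getD []

-- ===== PORT B =====
def nfacAux (n : Int) (i : Int) (count : Int) : Int :=
  if _h : i * i ≤ n then
    nfacAux n (i + 1)
      (if PySem.Int.mod n i = 0 then (if i * i = n then count + 1 else count + 2) else count)
  else count
termination_by (n + 1 - i).toNat
decreasing_by
  have hin : i ≤ n := by nlinarith
  omega

def nfac (n : Int) : Int := if n ≤ 0 then 0 else nfacAux n 1 0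

def solution_alt (arr : List Int) : List Int := PySem.List.sorted arr nfac true

-- ===== PRECONDITION & SPEC =====
def Spec_solution (arr : List Int) (out : List Int) : Prop := out = solution_alt arr
instance (arr : List Int) (out : List Int) : Decidable (Spec_solution arr out) := by unfold Spec_solution; infer_instance

-- ===== CLAIM (what is proved, stated in full; the proofs are below) =====
def Claim_equal_solution : Prop := ∀ (arr : List Int), Dom_solution arr → Spec_solution arr (solution arr)

-- ===== LEMMAS AND PROOFS =====

/- ---- Part 1: the two divisor counters agree ---- -/

def pvS (N i : Nat) : Nat := ((Finset.Icc i (N / i)).filter (fun d => d ∣ N)).card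

lemma pvS_stop {N i : Nat} (hi : 0 < i) (h : N < i * i) : pvS N i = 0 := by
  have hlt : N / i < i := (Nat.div_lt_iff_lt_mul hi).mpr h
  rw [pvS, Finset.Icc_eq_empty (by omega)]
  simp

lemma pvS_step {N i : Nat} (hi : 0 < i) (h : i * i ≤ N) :
    pvS N i = (if i ∣ N then (if i * i = N then 1 else 2) else 0) + pvS N (i + 1) := by
  by_cases hdvd : i ∣ N
  · have hq : i * (N / i) = N := Nat.mul_div_cancel' hdvd
    by_cases heq : i * i = N
    · have hqi : N / i = i := Nat.eq_of_mul_eq_mul_left hi (hq.trans heq.symm)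
      have h2 : pvS N (i + 1) = 0 := pvS_stop (by omega) (by nlinarith)
      rw [pvS, hqi, h2, Finset.Icc_self, Finset.filter_singleton, if_pos hdvd]
      simp [hdvd, heq]
    · have hii : i * i < N := lt_of_le_of_ne h heq
      have hiq : i < N / i := by
        have := Nat.lt_of_mul_lt_mul_left (a := i) (by omega : i * i < i * (N / i))
        exact this
      have hset : (Finset.Icc i (N / i)).filter (fun d => d ∣ N)
          = insert i (insert (N / i) ((Finset.Icc (i + 1) (N / (i + 1))).filter (fun d => d ∣ N))) := by
        ext d
        simp only [Finset.mem_filter, Finset.mem_Icc, Finset.mem_insert]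
        constructor
        · rintro ⟨⟨hd1, hd2⟩, hdN⟩
          by_cases hdi : d = i
          · exact Or.inl hdi
          by_cases hdq : d = N / i
          · exact Or.inr (Or.inl hdq)
          refine Or.inr (Or.inr ⟨⟨by omega, ?_⟩, hdN⟩)
          obtain ⟨e, he⟩ := hdN
          have hdq' : d < N / i := by omega
          have hdiN : d * i < N := by nlinarith
          have hie : i < e := by nlinarith
          have hie' : i + 1 ≤ e := by omega
          have : d * (i + 1) ≤ N := by nlinarith
          exact (Nat.le_div_iff_mul_le (by omega)).mpr this
        · rintro (rfl | rfl | ⟨⟨hd1, hd2⟩, hdN⟩)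
          · exact ⟨⟨le_refl _, by omega⟩, hdvd⟩
          · refine ⟨⟨by omega, le_refl _⟩, ?_⟩
            exact ⟨i, by rw [mul_comm]; exact hq.symm⟩
          · refine ⟨⟨by omega, ?_⟩, hdN⟩
            have h1 : d * (i + 1) ≤ N := (Nat.le_div_iff_mul_le (by omega)).mp hd2
            have h2 : d * i < N := by nlinarith
            exact (Nat.le_div_iff_mul_le hi).mpr h2.le
      have hq_notmem : N / i ∉ (Finset.Icc (i + 1) (N / (i + 1))).filter (fun d => d ∣ N) := by
        simp only [Finset.mem_filter, Finset.mem_Icc]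
        rintro ⟨⟨h1, h2⟩, _⟩
        have h3 : (N / i) * (i + 1) ≤ N := (Nat.le_div_iff_mul_le (by omega)).mp h2
        nlinarith
      have hi_notmem : i ∉ insert (N / i) ((Finset.Icc (i + 1) (N / (i + 1))).filter (fun d => d ∣ N)) := by
        simp only [Finset.mem_insert, Finset.mem_filter, Finset.mem_Icc]
        rintro (h1 | ⟨⟨h1, _⟩, _⟩) <;> omega
      rw [pvS, hset, Finset.card_insert_of_notMem hi_notmem, Finset.card_insert_of_notMem hq_notmem]
      rw [if_pos hdvd, if_neg heq]
      unfold pvS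
      omega
  · have hset : (Finset.Icc i (N / i)).filter (fun d => d ∣ N)
        = (Finset.Icc (i + 1) (N / (i + 1))).filter (fun d => d ∣ N) := by
      ext d
      simp only [Finset.mem_filter, Finset.mem_Icc]
      constructor
      · rintro ⟨⟨hd1, hd2⟩, hdN⟩
        have hdi : d ≠ i := by rintro rfl; exact hdvd hdN
        obtain ⟨e, he⟩ := hdN
        have hdiN : d * i ≤ N := (Nat.le_div_iff_mul_le hi).mp hd2
        have hd0 : 0 < d := by omega
        have hie : i ≤ e := by nlinarith
        have hei : e ≠ i := by
          rintro rfl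
          exact hdvd ⟨d, by rw [mul_comm]; exact he⟩
        have hie' : i + 1 ≤ e := by omega
        have : d * (i + 1) ≤ N := by nlinarith
        exact ⟨⟨by omega, (Nat.le_div_iff_mul_le (by omega)).mpr this⟩, ⟨e, he⟩⟩
      · rintro ⟨⟨hd1, hd2⟩, hdN⟩
        have h1 : d * (i + 1) ≤ N := (Nat.le_div_iff_mul_le (by omega)).mp hd2
        refine ⟨⟨by omega, (Nat.le_div_iff_mul_le hi).mpr (by nlinarith)⟩, hdN⟩
    rw [pvS, hset, if_neg hdvd]
    unfold pvS
    omega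

lemma nfacAux_pvS (N : Nat) :
    ∀ (fuel : Nat) (I : Nat) (c : Int), 0 < I → N + 1 - I ≤ fuel →
      nfacAux (N : Int) (I : Int) c = c + (pvS N I : Int) := by
  intro fuel
  induction fuel with
  | zero =>
    intro I c hI hf
    have hNI : N < I * I := by
      have h1 : I ≤ I * I := Nat.le_mul_of_pos_left I hI
      omega
    rw [nfacAux, dif_neg (by exact_mod_cast (by omega : ¬ ((I:Int) * I ≤ N)))]
    rw [pvS_stop hI hNI]
    simp
  | succ fuel ih =>
    intro I c hI hf
    by_cases hII : I * I ≤ N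
    · have hIN : I ≤ N := le_trans (Nat.le_mul_of_pos_left I hI) hII
      rw [nfacAux, dif_pos (by exact_mod_cast hII)]
      have hcast : ((I : Int) + 1) = ((I + 1 : Nat) : Int) := by push_cast; ring
      rw [hcast, ih (I + 1) _ (by omega) (by omega)]
      rw [pvS_step hI hII]
      have hdvd_iff : PySem.Int.mod (N : Int) (I : Int) = 0 ↔ I ∣ N := by
        rw [PySem.Int.mod_eq_zero_iff_dvd]
        exact Int.natCast_dvd_natCast
      have hsq_iff : ((I : Int) * I = (N : Int)) ↔ I * I = N := by
        constructor
        · intro h; exact_mod_cast h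
        · intro h; exact_mod_cast h
      by_cases hdvd : I ∣ N
      · rw [if_pos (hdvd_iff.mpr hdvd), if_pos hdvd]
        by_cases hsq : I * I = N
        · rw [if_pos (hsq_iff.mpr hsq), if_pos hsq]; push_cast; ring
        · rw [if_neg (fun h => hsq (hsq_iff.mp h)), if_neg hsq]; push_cast; ring
      · rw [if_neg (fun h => hdvd (hdvd_iff.mp h)), if_neg hdvd]
        push_cast; ring
    · rw [nfacAux, dif_neg (by exact_mod_cast hII)]
      rw [pvS_stop hI (by omega)]
      simp

lemma factorsA_eq_nfac : ∀ n : Int, factorsA n = nfac n := by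
  intro n
  by_cases hn : n ≤ 0
  · rw [factorsA, nfac, if_pos hn, PySem.List.pyRange_one_eq_nil (by omega)]
    rfl
  · push Not at hn
    set N : Nat := n.toNat with hN
    have hn' : (N : Int) = n := Int.toNat_of_nonneg (by omega)
    have hN1 : 1 ≤ N := by omega
    rw [factorsA, nfac, if_neg (by omega)]
    rw [PySem.List.foldl_ite_add_one (fun i => PySem.Int.mod n i = 0)]
    rw [PySem.List.pyRange_one, List.countP_map]
    have hcnt : List.countP ((fun i => decide (PySem.Int.mod n i = 0)) ∘ (fun k : Nat => (1 : Int) + k)) (List.range ((n + 1 - 1).toNat))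
        = List.countP (fun k : Nat => decide ((k + 1) ∣ N)) (List.range N) := by
      have hrange : (n + 1 - 1).toNat = N := by omega
      rw [hrange]
      apply List.countP_congr
      intro k _
      simp only [Function.comp_apply, decide_eq_true_eq]
      rw [PySem.Int.mod_eq_zero_iff_dvd]
      rw [← hn']
      rw [show (1 + (k : Int)) = ((k + 1 : Nat) : Int) by push_cast; ring]
      exact Int.natCast_dvd_natCast
    rw [hcnt]
    have hbridge : List.countP (fun k : Nat => decide ((k + 1) ∣ N)) (List.range N)
        = ((Finset.range N).filter (fun k => (k + 1) ∣ N)).card := by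
      rw [List.countP_eq_length_filter]
      rfl
    have hbij : ((Finset.range N).filter (fun k => (k + 1) ∣ N)).card
        = ((Finset.Icc 1 (N / 1)).filter (fun d => d ∣ N)).card := by
      rw [Nat.div_one]
      refine Finset.card_bij' (fun k _ => k + 1) (fun d _ => d - 1) ?_ ?_ ?_ ?_
      · intro k hk
        simp only [Finset.mem_filter, Finset.mem_range] at hk
        simp only [Finset.mem_filter, Finset.mem_Icc]
        exact ⟨⟨by omega, by omega⟩, hk.2⟩
      · intro d hd
        simp only [Finset.mem_filter, Finset.mem_Icc] at hd
        simp only [Finset.mem_filter, Finset.mem_range]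
        have : d - 1 + 1 = d := by omega
        rw [this]
        exact ⟨by omega, hd.2⟩
      · intro k _; dsimp only; omega
      · intro d hd
        simp only [Finset.mem_filter, Finset.mem_Icc] at hd
        dsimp only
        omega
    rw [hbridge, hbij]
    have := nfacAux_pvS N N 1 0 (by omega) (by omega)
    rw [hn'] at this
    norm_num at this
    rw [this, pvS]
    omega

/- ---- Part 2: order machinery ---- -/

lemma pvEq_of_perm_of_pairwise {α : Type} {Q : α → α → Prop}
    (hQ : ∀ a b, Q a b → ¬ Q b a) :
    ∀ {l₁ l₂ : List α}, l₁.Perm l₂ → l₁.Pairwise Q → l₂.Pairwise Q → l₁ = l₂ := by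
  intro l₁
  induction l₁ with
  | nil => intro l₂ hp _ _; simpa using hp.symm.eq_nil
  | cons a t ih =>
    intro l₂ hp h1 h2
    cases l₂ with
    | nil => simpa using hp.eq_nil
    | cons b t₂ =>
      have hab : a = b := by
        by_contra hne
        have ha2 : a ∈ b :: t₂ := hp.mem_iff.mp (List.mem_cons_self ..)
        have hb1 : b ∈ a :: t := hp.mem_iff.mpr (List.mem_cons_self ..)
        have ha2' : a ∈ t₂ := by
          rcases List.mem_cons.mp ha2 with h | h
          · exact absurd h hne
          · exact h
        have hb1' : b ∈ t := by
          rcases List.mem_cons.mp hb1 with h | h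
          · exact absurd h.symm hne
          · exact h
        exact hQ a b ((List.pairwise_cons.mp h1).1 b hb1') ((List.pairwise_cons.mp h2).1 a ha2')
      subst hab
      have hpt : t.Perm t₂ := hp.cons_inv
      rw [ih hpt (List.pairwise_cons.mp h1).2 (List.pairwise_cons.mp h2).2]

def pvQd {α : Type} (k ix : α → Int) (p q : α) : Prop :=
  k q < k p ∨ (k p = k q ∧ ix p < ix q)

lemma pvInsertBy_perm {α : Type} (bef : α → α → Bool) (x : α) (ys : List α) :
    (PySem.List.insertBy bef x ys).Perm (x :: ys) := by
  induction ys with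
  | nil => simp [PySem.List.insertBy]
  | cons y ys ih =>
    simp only [PySem.List.insertBy]
    split
    · exact List.Perm.refl _
    · exact (ih.cons y).trans (List.Perm.swap x y ys)

lemma pvInsertBy_pairwise {α : Type} (k ix : α → Int) (p : α) (ys : List α)
    (h1 : ys.Pairwise (pvQd k ix)) (h2 : ∀ q ∈ ys, ix q < ix p) :
    (PySem.List.insertBy (fun a b => decide (k b < k a)) p ys).Pairwise (pvQd k ix) := by
  induction ys with
  | nil => simp [PySem.List.insertBy]
  | cons y ys ih =>
    obtain ⟨hy, hys⟩ := List.pairwise_cons.mp h1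
    simp only [PySem.List.insertBy]
    split
    · rename_i hcond
      refine List.pairwise_cons.mpr ⟨?_, h1⟩
      intro q hq
      rcases List.mem_cons.mp hq with rfl | hq
      · exact Or.inl (by simpa using hcond)
      · have := hy q hq
        have hlt : k y < k p := by simpa using hcond
        unfold pvQd at this ⊢
        omega
    · rename_i hcond
      refine List.pairwise_cons.mpr ⟨?_, ih hys (fun q hq => h2 q (List.mem_cons_of_mem y hq))⟩
      intro q hq
      rcases (PySem.List.mem_insertBy _ _ _ _).mp hq with hqp | hq
      · rw [hqp]
        have hle : k p ≤ k y := by simpa using hcond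
        rcases lt_or_eq_of_le hle with h | h
        · exact Or.inl h
        · exact Or.inr ⟨h.symm, h2 y (List.mem_cons_self ..)⟩
      · exact hy q hq

lemma pvFoldlInsert_inv {α : Type} (k ix : α → Int) :
    ∀ (es acc : List α),
      es.Pairwise (fun p q => ix p < ix q) →
      acc.Pairwise (pvQd k ix) →
      (∀ q ∈ acc, ∀ e ∈ es, ix q < ix e) →
      (es.foldl (fun a x => PySem.List.insertBy (fun a b => decide (k b < k a)) x a) acc).Pairwise (pvQd k ix)
      ∧ (es.foldl (fun a x => PySem.List.insertBy (fun a b => decide (k b < k a)) x a) acc).Perm (acc ++ es) := by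
  intro es
  induction es with
  | nil => intro acc _ h2 _; exact ⟨h2, by simp⟩
  | cons e es ih =>
    intro acc h1 h2 h3
    obtain ⟨he, hes⟩ := List.pairwise_cons.mp h1
    simp only [List.foldl_cons]
    have hacc' : (PySem.List.insertBy (fun a b => decide (k b < k a)) e acc).Pairwise (pvQd k ix) :=
      pvInsertBy_pairwise k ix e acc h2 (fun q hq => h3 q hq e (List.mem_cons_self ..))
    have hb : ∀ q ∈ PySem.List.insertBy (fun a b => decide (k b < k a)) e acc, ∀ x ∈ es, ix q < ix x := by
      intro q hq x hx
      rcases (PySem.List.mem_insertBy _ _ _ _).mp hq with rfl | hq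
      · exact he x hx
      · exact h3 q hq x (List.mem_cons_of_mem e hx)
    obtain ⟨hp, hperm⟩ := ih _ hes hacc' hb
    exact ⟨hp, hperm.trans (((pvInsertBy_perm _ _ _).append_right es).trans List.perm_middle.symm)⟩

lemma pvInsertBy_map_snd {α : Type} (k : α → Int) (p : Int × α) (ps : List (Int × α)) :
    (PySem.List.insertBy (fun a b => decide (k b.2 < k a.2)) p ps).map Prod.snd
      = PySem.List.insertBy (fun a b => decide (k b < k a)) p.2 (ps.map Prod.snd) := by
  induction ps with
  | nil => simp [PySem.List.insertBy]
  | cons q ps ih =>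
    simp only [PySem.List.insertBy, List.map_cons]
    split <;> simp_all

lemma pvSorted_eq_map_snd {α : Type} (k : α → Int) (xs : List α) :
    PySem.List.sorted xs k true
      = ((PySem.List.enumerate xs 0).foldl
          (fun a x => PySem.List.insertBy (fun a b => decide (k b.2 < k a.2)) x a) []).map Prod.snd := by
  rw [PySem.List.sorted_rev_eq_foldl_insertBy]
  have h : ∀ (es : List (Int × α)) (acc : List (Int × α)),
      (es.foldl (fun a x => PySem.List.insertBy (fun a b => decide (k b.2 < k a.2)) x a) acc).map Prod.snd
        = (es.map Prod.snd).foldl (fun a x => PySem.List.insertBy (fun a b => decide (k b < k a)) x a) (acc.map Prod.snd) := by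
    intro es
    induction es with
    | nil => intro acc; rfl
    | cons e es ih => intro acc; simp only [List.foldl_cons, List.map_cons, ih, pvInsertBy_map_snd]
  rw [h, PySem.List.map_snd_enumerate]
  rfl

/- ---- Part 4: the swap sort as structural recursion ---- -/

lemma pvSetAt {α : Type} (pre : List α) (c v : α) (rest : List α) :
    (pre ++ c :: rest).set pre.length v = pre ++ v :: rest := by
  induction pre with
  | nil => rfl
  | cons p pre ih => simp [ih]

lemma pvGetAt {α : Type} (pre : List α) (c : α) (rest : List α) (d : α) :
    (pre ++ c :: rest).getD pre.length d = c := by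
  induction pre with
  | nil => rfl
  | cons p pre ih => simp

def pvPass {α : Type} (k : α → Int) : α → List α → α × List α
  | c, [] => (c, [])
  | c, x :: t =>
    if k x ≤ k c then ((pvPass k x t).1, c :: (pvPass k x t).2)
    else ((pvPass k c t).1, x :: (pvPass k c t).2)

def pvStep {α : Type} (k : α → Int) (d : α) (i : Int) (s : List α) (j : Int) : List α :=
  if k (PySem.List.pyGetD s j d) ≤ k (PySem.List.pyGetD s i d) then
    PySem.List.pySetD (PySem.List.pySetD s i (PySem.List.pyGetD s j d)) j (PySem.List.pyGetD s i d)
  else s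

lemma pvInner_eq {α : Type} (k : α → Int) (d : α) :
    ∀ (t mid pre : List α) (c : α),
      (PySem.List.pyRange ((pre.length : Int) + 1 + (mid.length : Int))
          ((pre.length : Int) + 1 + (mid.length : Int) + (t.length : Int)) 1).foldl
        (pvStep k d (pre.length : Int)) (pre ++ c :: (mid ++ t))
      = pre ++ (pvPass k c t).1 :: (mid ++ (pvPass k c t).2) := by
  intro t
  induction t with
  | nil =>
    intro mid pre c
    rw [PySem.List.pyRange_one_eq_nil (by simp)]
    simp [pvPass]
  | cons x t ih =>
    intro mid pre c
    have hlt : (pre.length : Int) + 1 + (mid.length : Int)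
        < (pre.length : Int) + 1 + (mid.length : Int) + ((x :: t).length : Int) := by
      simp only [List.length_cons]; push_cast; omega
    rw [PySem.List.pyRange_one_cons hlt, List.foldl_cons]
    have hcast : (pre.length : Int) + 1 + (mid.length : Int) = (((pre ++ c :: mid).length : Nat) : Int) := by
      simp only [List.length_append, List.length_cons]; push_cast; ring
    have hgj : PySem.List.pyGetD (pre ++ c :: (mid ++ x :: t)) ((pre.length : Int) + 1 + (mid.length : Int)) d = x := by
      rw [hcast, PySem.List.pyGetD_natCast]
      rw [show pre ++ c :: (mid ++ x :: t) = (pre ++ c :: mid) ++ x :: t by simp]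
      exact pvGetAt _ _ _ _
    have hgi : PySem.List.pyGetD (pre ++ c :: (mid ++ x :: t)) ((pre.length : Int)) d = c := by
      rw [PySem.List.pyGetD_natCast]
      exact pvGetAt _ _ _ _
    simp only [pvStep, hgj, hgi]
    by_cases hx : k x ≤ k c
    · rw [if_pos hx]
      have hset : PySem.List.pySetD
            (PySem.List.pySetD (pre ++ c :: (mid ++ x :: t)) ((pre.length : Int)) x)
            ((pre.length : Int) + 1 + (mid.length : Int)) c
          = pre ++ x :: ((mid ++ [c]) ++ t) := by
        rw [PySem.List.pySetD_natCast, pvSetAt]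
        have hcast2 : (pre.length : Int) + 1 + (mid.length : Int) = (((pre ++ x :: mid).length : Nat) : Int) := by
          simp only [List.length_append, List.length_cons]; push_cast; ring
        rw [hcast2, PySem.List.pySetD_natCast]
        rw [show pre ++ x :: (mid ++ x :: t) = (pre ++ x :: mid) ++ x :: t by simp]
        rw [pvSetAt]
        simp
      rw [hset]
      have hrange : PySem.List.pyRange ((pre.length : Int) + 1 + (mid.length : Int) + 1)
            ((pre.length : Int) + 1 + (mid.length : Int) + ((x :: t).length : Int)) 1
          = PySem.List.pyRange ((pre.length : Int) + 1 + (((mid ++ [c]).length : Nat) : Int))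
            ((pre.length : Int) + 1 + (((mid ++ [c]).length : Nat) : Int) + (t.length : Int)) 1 := by
        congr 1 <;> (simp only [List.length_append, List.length_cons, List.length_nil]; push_cast; ring)
      rw [hrange, ih (mid ++ [c]) pre x]
      simp only [pvPass, if_pos hx]
      simp
    · rw [if_neg hx]
      have hrange : PySem.List.pyRange ((pre.length : Int) + 1 + (mid.length : Int) + 1)
            ((pre.length : Int) + 1 + (mid.length : Int) + ((x :: t).length : Int)) 1
          = PySem.List.pyRange ((pre.length : Int) + 1 + (((mid ++ [x]).length : Nat) : Int))
            ((pre.length : Int) + 1 + (((mid ++ [x]).length : Nat) : Int) + (t.length : Int)) 1 := by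
        congr 1 <;> (simp only [List.length_append, List.length_cons, List.length_nil]; push_cast; ring)
      rw [show pre ++ c :: (mid ++ x :: t) = pre ++ c :: ((mid ++ [x]) ++ t) by simp]
      rw [hrange, ih (mid ++ [x]) pre c]
      simp only [pvPass, if_neg hx]
      simp

lemma pvPass_length {α : Type} (k : α → Int) (c : α) (t : List α) :
    (pvPass k c t).2.length = t.length := by
  induction t generalizing c with
  | nil => rfl
  | cons x t ih => simp only [pvPass]; split <;> simp [ih]

def pvSelsort {α : Type} (k : α → Int) : List α → List α
  | [] => []
  | c :: t => (pvPass k c t).1 :: pvSelsort k (pvPass k c t).2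
termination_by l => l.length
decreasing_by simp [pvPass_length]

lemma pvOuter_eq {α : Type} (k : α → Int) (d : α) :
    ∀ (fuel : Nat) (rest done : List α), rest.length ≤ fuel →
      (PySem.List.pyRange (done.length : Int) ((done.length : Int) + (rest.length : Int)) 1).foldl
        (fun s i => (PySem.List.pyRange (i + 1) ((s.length : Int)) 1).foldl (pvStep k d i) s)
        (done ++ rest)
      = done ++ pvSelsort k rest := by
  intro fuel
  induction fuel with
  | zero =>
    intro rest done hl
    have : rest = [] := List.length_eq_zero_iff.mp (Nat.le_zero.mp hl)
    subst this
    rw [PySem.List.pyRange_one_eq_nil (by omega)]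
    simp [pvSelsort]
  | succ fuel ihf =>
    intro rest done hl
    cases rest with
    | nil =>
      rw [PySem.List.pyRange_one_eq_nil (by simp)]
      simp [pvSelsort]
    | cons c t =>
      have hlt : (done.length : Int) < (done.length : Int) + ((c :: t).length : Int) := by
        simp only [List.length_cons]; push_cast; omega
      rw [PySem.List.pyRange_one_cons hlt, List.foldl_cons]
      have hinner :
          (PySem.List.pyRange ((done.length : Int) + 1) (((done ++ c :: t).length : Int)) 1).foldl
            (pvStep k d (done.length : Int)) (done ++ c :: t)
          = done ++ (pvPass k c t).1 :: (pvPass k c t).2 := by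
        have hr : PySem.List.pyRange ((done.length : Int) + 1) (((done ++ c :: t).length : Int)) 1
            = PySem.List.pyRange ((done.length : Int) + 1 + (([] : List α).length : Int))
                ((done.length : Int) + 1 + (([] : List α).length : Int) + (t.length : Int)) 1 := by
          congr 1; simp only [List.length_append, List.length_cons, List.length_nil]; push_cast; ring
        rw [hr, show done ++ c :: t = done ++ c :: (([] : List α) ++ t) by simp,
          pvInner_eq k d t [] done c]
        simp
      rw [hinner]
      have hr2 : PySem.List.pyRange ((done.length : Int) + 1)
            ((done.length : Int) + ((c :: t).length : Int)) 1
          = PySem.List.pyRange (((done ++ [(pvPass k c t).1]).length : Int))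
              (((done ++ [(pvPass k c t).1]).length : Int) + (((pvPass k c t).2).length : Int)) 1 := by
        congr 1 <;> · simp only [List.length_append, List.length_cons, List.length_nil,
          pvPass_length]; push_cast; ring
      rw [show done ++ (pvPass k c t).1 :: (pvPass k c t).2 = (done ++ [(pvPass k c t).1]) ++ (pvPass k c t).2 by simp, hr2,
        ihf (pvPass k c t).2 (done ++ [(pvPass k c t).1]) (by rw [pvPass_length]; simpa using hl)]
      rw [pvSelsort]
      simp

/- ---- Part 5: pass/selsort ordering properties ---- -/

def pvT {α : Type} (k ix : α → Int) (p q : α) : Prop := k p = k q → ix p < ix q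

lemma pvPass_perm {α : Type} (k : α → Int) (c : α) (t : List α) :
    ((pvPass k c t).1 :: (pvPass k c t).2).Perm (c :: t) := by
  induction t generalizing c with
  | nil => rfl
  | cons x t ih =>
    simp only [pvPass]
    split
    · exact (List.Perm.swap _ _ _).trans ((ih x).cons c)
    · exact (List.Perm.swap _ _ _).trans ((ih c).cons x) |>.trans (List.Perm.swap _ _ _)

lemma pvPass_min {α : Type} (k : α → Int) (c : α) (t : List α) :
    ∀ x ∈ c :: t, k (pvPass k c t).1 ≤ k x := by
  induction t generalizing c with
  | nil =>
    intro x hx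
    rcases List.mem_cons.mp hx with rfl | h
    · exact le_refl _
    · simp at h
  | cons y t ih =>
    intro x hx
    simp only [pvPass]
    split
    · rename_i hc
      rcases List.mem_cons.mp hx with rfl | hx
      · exact (ih y y (List.mem_cons_self ..)).trans hc
      · exact ih y x hx
    · rename_i hc
      push Not at hc
      rcases List.mem_cons.mp hx with rfl | hx
      · exact ih x x (List.mem_cons_self ..)
      · rcases List.mem_cons.mp hx with rfl | hx
        · exact ((ih c c (List.mem_cons_self ..)).trans hc.le)
        · exact ih c x (List.mem_cons_of_mem c hx)

lemma pvPass_props {α : Type} (k ix : α → Int) (c : α) (t : List α)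
    (h : (c :: t).Pairwise (pvT k ix)) :
    (∀ x ∈ (pvPass k c t).2, k x = k (pvPass k c t).1 → ix x < ix (pvPass k c t).1)
    ∧ (pvPass k c t).2.Pairwise (pvT k ix) := by
  induction t generalizing c with
  | nil => exact ⟨by simp [pvPass], by simp [pvPass]⟩
  | cons x t ih =>
    obtain ⟨hc, hxt⟩ := List.pairwise_cons.mp h
    simp only [pvPass]
    split
    · rename_i hswap
      obtain ⟨ihm, ihp⟩ := ih x hxt
      constructor
      · dsimp only
        intro z hz hkz
        rcases List.mem_cons.mp hz with rfl | hz
        · -- z = c; k c = k m, m = (pvPass k x t).1 ∈ x :: t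
          have hmem : (pvPass k x t).1 ∈ x :: t := (pvPass_perm k x t).subset (List.mem_cons_self ..)
          have hmx : k (pvPass k x t).1 ≤ k x := pvPass_min k x t x (List.mem_cons_self ..)
          rcases List.mem_cons.mp hmem with hm | hm
          · rw [hm]
            exact (List.pairwise_cons.mp h).1 x (List.mem_cons_self ..) (by omega)
          · exact hc _ (List.mem_cons_of_mem x hm) hkz
        · exact ihm z hz hkz
      · dsimp only
        refine List.pairwise_cons.mpr ⟨?_, ihp⟩
        intro q hq
        have hq' : q ∈ x :: t := ((pvPass_perm k x t).subset (List.mem_cons_of_mem _ hq))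
        exact hc q hq'
    · rename_i hswap
      push Not at hswap
      obtain ⟨ihm, ihp⟩ := ih c (List.pairwise_cons.mpr ⟨fun q hq => hc q (List.mem_cons_of_mem x hq), (List.pairwise_cons.mp hxt).2⟩)
      constructor
      · dsimp only
        intro z hz hkz
        rcases List.mem_cons.mp hz with rfl | hz
        · -- z = x: impossible, k m ≤ k c < k x
          have : k (pvPass k c t).1 ≤ k c := pvPass_min k c t c (List.mem_cons_self ..)
          omega
        · exact ihm z hz hkz
      · dsimp only
        refine List.pairwise_cons.mpr ⟨?_, ihp⟩
        intro q hq hkq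
        have hq' : q ∈ c :: t := (pvPass_perm k c t).subset (List.mem_cons_of_mem _ hq)
        rcases List.mem_cons.mp hq' with rfl | hq'
        · -- q = c: k x = k c contradicts k c < k x
          omega
        · exact (List.pairwise_cons.mp hxt).1 q hq' hkq

lemma pvSelsort_props {α : Type} (k ix : α → Int) :
    ∀ (fuel : Nat) (l : List α), l.length ≤ fuel → l.Pairwise (pvT k ix) →
      (pvSelsort k l).Perm l
      ∧ (pvSelsort k l).Pairwise (fun p q => k p < k q ∨ (k p = k q ∧ ix q < ix p)) := by
  intro fuel
  induction fuel with
  | zero =>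
    intro l hl _
    have : l = [] := List.length_eq_zero_iff.mp (Nat.le_zero.mp hl)
    subst this
    exact ⟨by simp [pvSelsort], by simp [pvSelsort]⟩
  | succ fuel ih =>
    intro l hl hT
    cases l with
    | nil => exact ⟨by simp [pvSelsort], by simp [pvSelsort]⟩
    | cons c t =>
      obtain ⟨hmin, hpw⟩ := pvPass_props k ix c t hT
      have hlen : (pvPass k c t).2.length ≤ fuel := by
        rw [pvPass_length]; simpa using hl
      obtain ⟨ihperm, ihpw⟩ := ih _ hlen hpw
      rw [pvSelsort]
      constructor
      · exact (ihperm.cons _).trans (pvPass_perm k c t)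
      · refine List.pairwise_cons.mpr ⟨?_, ihpw⟩
        intro q hq
        have hq' : q ∈ (pvPass k c t).2 := ihperm.subset hq
        have h1 : k (pvPass k c t).1 ≤ k q := by
          have : q ∈ c :: t := (pvPass_perm k c t).subset (List.mem_cons_of_mem _ hq')
          exact pvPass_min k c t q this
        rcases lt_or_eq_of_le h1 with h | h
        · exact Or.inl h
        · exact Or.inr ⟨h, hmin q hq' h.symm⟩

/- ---- Part 6: two-list state = zipped pair-list state ---- -/

def pvStep2 (i : Int) (st : List Int × List Int) (j : Int) : List Int × List Int :=
  if PySem.List.pyGetD st.1 i 0 ≥ PySem.List.pyGetD st.1 j 0 then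
    let temp := PySem.List.pyGetD st.1 i 0
    let values' := PySem.List.pySetD st.1 i (PySem.List.pyGetD st.1 j 0)
    let values'' := PySem.List.pySetD values' j temp
    let temp2 := PySem.List.pyGetD st.2 i 0
    let arr' := PySem.List.pySetD st.2 i (PySem.List.pyGetD st.2 j 0)
    let arr'' := PySem.List.pySetD arr' j temp2
    (values'', arr'')
  else st

lemma pvSetD_map {α β : Type} (f : α → β) (s : List α) (i : Int) (v : α) :
    PySem.List.pySetD (s.map f) i (f v) = (PySem.List.pySetD s i v).map f := by
  simp only [PySem.List.pySetD, PySem.List.pySet?, List.length_map]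
  cases PySem.List.pyIdx? s.length i <;> simp [List.map_set]

lemma pvStep2_corr (i j : Int) (s : List (Int × Int)) :
    pvStep2 i (s.map Prod.fst, s.map Prod.snd) j
      = ((pvStep Prod.fst (0, 0) i s j).map Prod.fst, (pvStep Prod.fst (0, 0) i s j).map Prod.snd) := by
  have hg1 : ∀ m : Int, PySem.List.pyGetD (s.map Prod.fst) m 0 = (PySem.List.pyGetD s m ((0 : Int), (0 : Int))).1 :=
    fun m => PySem.List.pyGetD_map Prod.fst s m (0, 0)
  have hg2 : ∀ m : Int, PySem.List.pyGetD (s.map Prod.snd) m 0 = (PySem.List.pyGetD s m ((0 : Int), (0 : Int))).2 :=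
    fun m => PySem.List.pyGetD_map Prod.snd s m (0, 0)
  simp only [pvStep2, pvStep, ge_iff_le, hg1, hg2]
  split
  · simp only [← pvSetD_map]
  · rfl

lemma pvFoldl_corr :
    ∀ (js : List Int) (i : Int) (s : List (Int × Int)),
      js.foldl (pvStep2 i) (s.map Prod.fst, s.map Prod.snd)
        = ((js.foldl (pvStep Prod.fst (0, 0) i) s).map Prod.fst,
           (js.foldl (pvStep Prod.fst (0, 0) i) s).map Prod.snd) := by
  intro js
  induction js with
  | nil => intro i s; rfl
  | cons j js ih => intro i s; simp only [List.foldl_cons, pvStep2_corr, ih]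

lemma pvOuter_corr :
    ∀ (is : List Int) (s : List (Int × Int)),
      is.foldl (fun st i => (PySem.List.pyRange (i + 1) ((st.1.length : Int)) 1).foldl (pvStep2 i) st)
          (s.map Prod.fst, s.map Prod.snd)
        = ((is.foldl (fun s i => (PySem.List.pyRange (i + 1) ((s.length : Int)) 1).foldl (pvStep Prod.fst (0, 0) i) s) s).map Prod.fst,
           (is.foldl (fun s i => (PySem.List.pyRange (i + 1) ((s.length : Int)) 1).foldl (pvStep Prod.fst (0, 0) i) s) s).map Prod.snd) := by
  intro is
  induction is with
  | nil => intro s; rfl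
  | cons i is ih =>
    intro s
    simp only [List.foldl_cons, List.length_map, pvFoldl_corr, ih]

/- ---- Part 7: assembling the equivalence ---- -/

lemma pvPass_map {α β : Type} (k : β → Int) (f : α → β) :
    ∀ (t : List α) (c : α),
      f (pvPass (fun a => k (f a)) c t).1 = (pvPass k (f c) (t.map f)).1
      ∧ (pvPass (fun a => k (f a)) c t).2.map f = (pvPass k (f c) (t.map f)).2 := by
  intro t
  induction t with
  | nil => intro c; exact ⟨rfl, rfl⟩
  | cons x t ih =>
    intro c
    simp only [pvPass, List.map_cons]
    by_cases hx : k (f x) ≤ k (f c)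
    · rw [if_pos hx, if_pos hx]
      exact ⟨(ih x).1, by simp [(ih x).2]⟩
    · rw [if_neg hx, if_neg hx]
      exact ⟨(ih c).1, by simp [(ih c).2]⟩

lemma pvSelsort_map {α β : Type} (k : β → Int) (f : α → β) :
    ∀ (fuel : Nat) (l : List α), l.length ≤ fuel →
      (pvSelsort (fun a => k (f a)) l).map f = pvSelsort k (l.map f) := by
  intro fuel
  induction fuel with
  | zero =>
    intro l hl
    have : l = [] := List.length_eq_zero_iff.mp (Nat.le_zero.mp hl)
    subst this
    simp [pvSelsort]
  | succ fuel ih =>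
    intro l hl
    cases l with
    | nil => simp [pvSelsort]
    | cons c t =>
      rw [pvSelsort, List.map_cons]
      rw [show (c :: t).map f = f c :: t.map f from rfl, pvSelsort]
      rw [(pvPass_map k f t c).1, ← (pvPass_map k f t c).2]
      rw [ih _ (by rw [pvPass_length]; simpa using hl)]

lemma pvEnumerate_map {α β : Type} (h : α → β) :
    ∀ (xs : List α) (s : Int),
      PySem.List.enumerate (xs.map h) s
        = (PySem.List.enumerate xs s).map (fun p => (p.1, h p.2)) := by
  intro xs
  induction xs with
  | nil => intro s; rfl
  | cons x xs ih =>
    intro s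
    simp only [List.map_cons, PySem.List.enumerate_cons, ih]

lemma pvQd_asymm {α : Type} (k ix : α → Int) (p q : α) : pvQd k ix p q → ¬ pvQd k ix q p := by
  intro h1 h2
  rcases h1 with h1 | ⟨h1, h1'⟩ <;> rcases h2 with h2 | ⟨h2, h2'⟩ <;> omega

lemma pvStability (arr : List Int) :
    (List.map Prod.snd (pvSelsort Prod.fst (List.map (fun x => (factorsA x, x)) arr))).reverse
      = solution_alt arr := by
  have hnf : nfac = factorsA := (funext factorsA_eq_nfac).symm
  set s0 : List (Int × Int) := List.map (fun x => (factorsA x, x)) arr with hs0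
  set E : List (Int × (Int × Int)) := PySem.List.enumerate s0 0 with hE
  set k3 : Int × (Int × Int) → Int := fun e => e.2.1 with hk3
  set R : List (Int × (Int × Int)) := pvSelsort k3 E with hR
  -- A: commute the selection sort with the projection
  have hA : pvSelsort Prod.fst s0 = R.map Prod.snd := by
    have h1 := pvSelsort_map (k := Prod.fst) (f := (Prod.snd : Int × (Int × Int) → Int × Int))
      E.length E (le_refl _)
    have h2 : E.map Prod.snd = s0 := PySem.List.map_snd_enumerate s0 0
    rw [h2] at h1
    exact h1.symm
  -- B: ordering properties of the selection sort on the indexed list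
  have hEpw : E.Pairwise (pvT k3 Prod.fst) := by
    refine (PySem.List.pairwise_lt_enumerate s0 0).imp ?_
    intro p q h _
    exact h
  obtain ⟨hRperm, hRpw⟩ := pvSelsort_props k3 Prod.fst E.length E (le_refl _) hEpw
  -- C: the insertion sort on the indexed list
  set kp : Int × Int → Int := fun p => nfac p.2 with hkp
  set es : List (Int × Int) := PySem.List.enumerate arr 0 with hes
  set F : List (Int × Int) :=
    es.foldl (fun a x => PySem.List.insertBy (fun a b => decide (kp b < kp a)) x a) [] with hF
  obtain ⟨hFpw, hFperm⟩ := pvFoldlInsert_inv kp Prod.fst es []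
    (PySem.List.pairwise_lt_enumerate arr 0)
    List.Pairwise.nil (by simp)
  have hsorted : solution_alt arr = F.map Prod.snd := by
    rw [solution_alt]
    exact pvSorted_eq_map_snd nfac arr
  -- D: transport F to the triple type
  set g : Int × Int → Int × (Int × Int) := fun p => (p.1, (factorsA p.2, p.2)) with hg
  set G : List (Int × (Int × Int)) := F.map g with hG
  have hGE : es.map g = E := by
    rw [hE, hs0, pvEnumerate_map, hes]
  have hGperm : G.Perm E := by
    rw [← hGE]
    simpa using hFperm.map g
  have hGpw : G.Pairwise (pvQd k3 Prod.fst) := by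
    refine hFpw.map g ?_
    intro p q h
    simp only [hkp, hnf] at h
    rcases h with h | ⟨h, h'⟩
    · exact Or.inl (by simp only [hg, hk3]; exact h)
    · exact Or.inr ⟨by simp only [hg, hk3]; exact h, h'⟩
  -- E: the reversed selection result is ordered the same way
  have hRrevpw : R.reverse.Pairwise (pvQd k3 Prod.fst) := by
    rw [List.pairwise_reverse]
    refine hRpw.imp ?_
    intro p q h
    rcases h with h | ⟨h, h'⟩
    · exact Or.inl h
    · exact Or.inr ⟨h.symm, h'⟩
  have hRrevperm : R.reverse.Perm E := (List.reverse_perm R).trans hRperm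
  -- F: uniqueness
  have heq : R.reverse = G :=
    pvEq_of_perm_of_pairwise (pvQd_asymm k3 Prod.fst) (hRrevperm.trans hGperm.symm) hRrevpw hGpw
  -- G: conclude
  rw [hA, ← List.map_reverse, ← List.map_reverse, heq, hG, List.map_map, hsorted,
    List.map_map]
  exact List.map_congr_left (fun p _ => rfl)

theorem solution_spec : Claim_equal_solution := by
  intro arr _
  unfold Spec_solution
  -- abbreviations
  set s0 : List (Int × Int) := arr.map (fun x => (factorsA x, x)) with hs0
  have hfst : s0.map Prod.fst = arr.map factorsA := by
    rw [hs0, List.map_map]; rfl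
  have hsnd : s0.map Prod.snd = arr := by
    rw [hs0, List.map_map]
    exact List.map_id arr
  -- 1. the values list
  have hvals : arr.foldl (fun acc i => acc ++ [factorsA i]) [] = arr.map factorsA := by
    simpa using PySem.List.foldl_append_singleton_eq_map factorsA arr []
  -- 2. unfold the port to the pvStep2 form
  have hsol : solution arr
      = (PySem.List.slice?
          (((PySem.List.pyRange 0 ((arr.map factorsA).length : Int) 1).foldl
            (fun st i => (PySem.List.pyRange (i + 1) ((st.1.length : Int)) 1).foldl (pvStep2 i) st)
            (arr.map factorsA, arr)).2) none none (-1)).getD [] := by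
    rw [solution]
    rw [hvals]
    rfl
  -- 3. two-list state = pair-list state
  rw [hsol, ← hfst]
  conv_lhs => rw [← hsnd]
  rw [pvOuter_corr]
  -- 4. the index program is selection sort
  have hlen : ((s0.map Prod.fst).length : Int) = (s0.length : Int) := by simp
  have houter :
      ((PySem.List.pyRange 0 ((s0.map Prod.fst).length : Int) 1).foldl
        (fun s i => (PySem.List.pyRange (i + 1) ((s.length : Int)) 1).foldl (pvStep Prod.fst ((0 : Int), (0 : Int)) i) s)
        s0)
      = pvSelsort Prod.fst s0 := by
    have := pvOuter_eq Prod.fst ((0 : Int), (0 : Int)) s0.length s0 [] (le_refl _)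
    simpa using this
  rw [houter, PySem.List.slice?_none_none_neg_one]
  simp only [Option.getD_some]
  -- 5. stability
  exact pvStability arr
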